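-- pv_equiv track=rewrite | github.com/alliyah95/discrete-math-tools | relation-tools/general_functions.py | compose_relation_with_itself
-- ===== SOURCE A (Python) =====
-- def compose_relation_with_itself(relation, num_times):
--     composite = []
--     single_pair = []
--     relation_one = list(relation)
--     relation_two = list(relation)
--
--     for x in range(num_times):
-- 	    for x in relation_one:
-- 		    for y in relation_two:
-- 			    if y[0] == x[1]:
-- 				    single_pair.extend([x[0], y[1]])
-- 				    if tuple(single_pair) not in composite:
-- 					    composite.append(tuple(single_pair))
-- 				    single_pair = []
-- 	    relation_two = list(composite)
-- 	    composite = []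
--     return relation_two
-- ===== SOURCE B (Python) =====
-- def compose_relation_with_itself(relation, num_times):
--     current = list(relation)
--     for _ in range(num_times):
--         index = {}
--         for b, c in current:
--             index.setdefault(b, []).append(c)
--         result = []
--         seen = set()
--         for a, b in relation:
--             for c in index.get(b, ()):
--                 if (a, c) not in seen:
--                     seen.add((a, c))
--                     result.append((a, c))
--         current = result
--     return current
-- ===== Notes on version B (the rewrite author's own statement) =====
-- stated objective: alternative
-- what changed: Each composition pass builds a dict indexing the current relation by first component so matching pairs are looked up instead of scanning the whole list, and dedup uses a set alongside the ordered output instead of a linear 'not in' scan of the output list.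
import Mathlib
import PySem

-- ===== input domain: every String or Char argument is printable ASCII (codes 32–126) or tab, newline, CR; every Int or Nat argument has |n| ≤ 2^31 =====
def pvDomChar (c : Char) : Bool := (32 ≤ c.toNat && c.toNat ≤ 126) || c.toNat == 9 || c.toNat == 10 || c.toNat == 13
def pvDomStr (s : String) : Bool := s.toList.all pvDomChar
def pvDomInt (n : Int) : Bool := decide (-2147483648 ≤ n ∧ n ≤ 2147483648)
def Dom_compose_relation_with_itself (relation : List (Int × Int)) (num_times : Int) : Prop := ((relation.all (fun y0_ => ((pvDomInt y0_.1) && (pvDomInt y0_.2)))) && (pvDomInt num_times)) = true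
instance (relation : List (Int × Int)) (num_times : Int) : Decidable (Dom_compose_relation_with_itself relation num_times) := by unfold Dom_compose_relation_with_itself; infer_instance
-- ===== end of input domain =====

-- B replaces A's full scan of relation_two per pair by a dict index on first components
-- plus a set for the dedup test (objective: alternative); return values are proved identical.

-- ===== PORT A =====
-- for x in range(num_times): rebuild composite from relation_one × relation_two, dedup by list membership
def compose_relation_with_itself (relation : List (Int × Int)) (num_times : Int) : List (Int × Int) :=
  (PySem.List.pyRange 0 num_times 1).foldl
    (fun relation_two _ =>
      relation.foldl
        (fun composite x =>
          relation_two.foldl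
            (fun composite y =>
              if y.1 == x.2 then
                if (x.1, y.2) ∈ composite then composite
                else composite ++ [(x.1, y.2)]
              else composite)
            composite)
        [])
    relation

-- ===== PORT B =====
-- index = {}; for (b, c) in current: index.setdefault(b, []).append(c)
def pvIndex (current : List (Int × Int)) : PySem.Dict Int (List Int) :=
  current.foldl (fun d p => PySem.Dict.modify d p.1 [] (fun l => l ++ [p.2])) PySem.Dict.empty

-- one composition step over the index, with (result, seen) as the fold state
def pvStep (relation current : List (Int × Int)) : List (Int × Int) :=
  let index := pvIndex current
  (relation.foldl
    (fun (acc : List (Int × Int) × PySem.Set (Int × Int)) p =>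
      (PySem.Dict.getD index p.2 []).foldl
        (fun acc c =>
          if (p.1, c) ∈ acc.2 then acc
          else (acc.1 ++ [(p.1, c)], PySem.Set.add acc.2 (p.1, c)))
        acc)
    ([], PySem.Set.empty)).1

def compose_relation_with_itself_alt (relation : List (Int × Int)) (num_times : Int) : List (Int × Int) :=
  (PySem.List.pyRange 0 num_times 1).foldl (fun current _ => pvStep relation current) relation

-- ===== PRECONDITION & SPEC =====
def Spec_compose_relation_with_itself (relation : List (Int × Int)) (num_times : Int) (out : List (Int × Int)) : Prop := out = compose_relation_with_itself_alt relation num_times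
instance (relation : List (Int × Int)) (num_times : Int) (out : List (Int × Int)) : Decidable (Spec_compose_relation_with_itself relation num_times out) := by unfold Spec_compose_relation_with_itself; infer_instance

-- ===== CLAIM (what is proved, stated in full; the proofs are below) =====
def Claim_equal_compose_relation_with_itself : Prop := ∀ (relation : List (Int × Int)) (num_times : Int), Dom_compose_relation_with_itself relation num_times → Spec_compose_relation_with_itself relation num_times (compose_relation_with_itself relation num_times)

-- ===== LEMMAS AND PROOFS =====

-- the dedup step on the A side (membership in the output list) and on the B side (membership in `seen`)
def pvStepA (comp : List (Int × Int)) (q : Int × Int) : List (Int × Int) :=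
  if q ∈ comp then comp else comp ++ [q]

def pvStepB (acc : List (Int × Int) × PySem.Set (Int × Int)) (q : Int × Int) :
    List (Int × Int) × PySem.Set (Int × Int) :=
  if q ∈ acc.2 then acc else (acc.1 ++ [q], PySem.Set.add acc.2 q)

-- the candidate pairs contributed by x, in A's and B's shared visiting order
def pvCands (cur : List (Int × Int)) (x : Int × Int) : List (Int × Int) :=
  ((cur.filter (fun y => y.1 == x.2)).map Prod.snd).map (fun c => (x.1, c))

-- the index's entry at k lists the second components of the pairs of `cur` whose first component is k
lemma pvIndex_getD (cur : List (Int × Int)) :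
    ∀ (d : PySem.Dict Int (List Int)) (k : Int),
      PySem.Dict.getD (cur.foldl (fun d p => PySem.Dict.modify d p.1 [] (fun l => l ++ [p.2])) d) k []
        = PySem.Dict.getD d k [] ++ (cur.filter (fun p => p.1 == k)).map Prod.snd := by
  induction cur with
  | nil => intro d k; simp
  | cons p t ih =>
      intro d k
      simp only [List.foldl_cons, ih, PySem.Dict.getD_modify, List.filter_cons]
      by_cases h : p.1 = k
      · simp [h]
      · simp [Ne.symm h, (by simpa using h : (p.1 == k) = false)]

-- a fold guarded by `y.1 == b` is a fold over the filtered second components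
lemma foldl_guard_filter {α : Type} (b : Int) (g : α → Int → α) (cur : List (Int × Int)) :
    ∀ (s : α),
      cur.foldl (fun s y => if y.1 == b then g s y.2 else s) s
        = ((cur.filter (fun y => y.1 == b)).map Prod.snd).foldl g s := by
  induction cur with
  | nil => intro s; rfl
  | cons y t ih =>
      intro s
      simp only [List.foldl_cons, List.filter_cons]
      by_cases h : y.1 = b
      · have h' : (y.1 == b) = true := by simpa using h
        rw [if_pos h', if_pos h']
        simp only [List.map_cons, List.foldl_cons]
        exact ih _
      · have h' : ¬ ((y.1 == b) = true) := by simpa using h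
        rw [if_neg h', if_neg h']
        exact ih s

-- a fold of inner folds is a fold over the flattened candidate list
lemma foldl_inner_flat {α β σ : Type} (F : α → List β) (g : σ → β → σ) (l : List α) :
    ∀ (acc : σ),
      l.foldl (fun acc p => (F p).foldl g acc) acc = (l.flatMap F).foldl g acc := by
  induction l with
  | nil => intro acc; rfl
  | cons p t ih => intro acc; simp only [List.foldl_cons, List.flatMap_cons, List.foldl_append, ih]

-- the `seen` set holds exactly the members of the output list
def InvSeen (res : List (Int × Int)) (seen : PySem.Set (Int × Int)) : Prop := ∀ q, q ∈ seen ↔ q ∈ res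

-- the (result, seen) dedup fold computes A's list-membership dedup fold
lemma dedup_fold (qs : List (Int × Int)) :
    ∀ (res : List (Int × Int)) (seen : PySem.Set (Int × Int)), InvSeen res seen →
      (qs.foldl pvStepB (res, seen)).1 = qs.foldl pvStepA res := by
  induction qs with
  | nil => intro res seen _; rfl
  | cons q t ih =>
      intro res seen h
      simp only [List.foldl_cons, pvStepA, pvStepB]
      by_cases hc : q ∈ res
      · have hs : q ∈ seen := (h q).mpr hc
        simp only [hs, hc, if_pos]
        exact ih res seen h
      · have hs : q ∉ seen := fun hx => hc ((h q).mp hx)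
        simp only [hs, hc, if_neg, not_false_iff]
        refine ih _ _ ?_
        intro r
        simp [PySem.Set.mem_add, h r, or_comm]

-- one step of B equals one pass of A's nested loops
lemma step_eq (rel cur : List (Int × Int)) :
    pvStep rel cur
      = rel.foldl
          (fun composite x =>
            cur.foldl
              (fun composite y =>
                if y.1 == x.2 then
                  if (x.1, y.2) ∈ composite then composite
                  else composite ++ [(x.1, y.2)]
                else composite)
              composite)
          [] := by
  unfold pvStep
  have hidx : ∀ b : Int, PySem.Dict.getD (pvIndex cur) b []
      = (cur.filter (fun y => y.1 == b)).map Prod.snd := by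
    intro b
    simpa [pvIndex, PySem.Dict.getD_empty] using pvIndex_getD cur PySem.Dict.empty b
  calc (rel.foldl
          (fun (acc : List (Int × Int) × PySem.Set (Int × Int)) p =>
            (PySem.Dict.getD (pvIndex cur) p.2 []).foldl
              (fun acc c =>
                if (p.1, c) ∈ acc.2 then acc
                else (acc.1 ++ [(p.1, c)], PySem.Set.add acc.2 (p.1, c)))
              acc)
          ([], PySem.Set.empty)).1
      = (rel.foldl (fun acc p => (pvCands cur p).foldl pvStepB acc) ([], PySem.Set.empty)).1 := by
        congr 1
        refine PySem.List.foldl_congr_mem _ _ _ _ ?_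
        intro acc p _
        rw [hidx p.2]
        exact (List.foldl_map (f := fun c => (p.1, c)) (g := pvStepB)).symm
    _ = ((rel.flatMap (pvCands cur)).foldl pvStepB ([], PySem.Set.empty)).1 := by
        rw [foldl_inner_flat]
    _ = (rel.flatMap (pvCands cur)).foldl pvStepA [] :=
        dedup_fold _ [] PySem.Set.empty (by intro q; simp [PySem.Set.empty])
    _ = rel.foldl (fun comp p => (pvCands cur p).foldl pvStepA comp) [] := by
        rw [foldl_inner_flat]
    _ = rel.foldl
          (fun composite x =>
            cur.foldl
              (fun composite y =>
                if y.1 == x.2 then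
                  if (x.1, y.2) ∈ composite then composite
                  else composite ++ [(x.1, y.2)]
                else composite)
              composite)
          [] := by
        refine PySem.List.foldl_congr_mem _ _ _ _ ?_
        intro comp x _
        refine Eq.symm ?_
        refine Eq.trans (foldl_guard_filter x.2
          (fun comp c => if (x.1, c) ∈ comp then comp else comp ++ [(x.1, c)]) cur comp) ?_
        exact (List.foldl_map (f := fun c => (x.1, c)) (g := pvStepA)).symm

-- ===== VERDICT (by name: the statement is the Claim_ definition above) =====
theorem compose_relation_with_itself_spec : Claim_equal_compose_relation_with_itself := by
  intro relation num_times _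
  unfold Spec_compose_relation_with_itself
  unfold compose_relation_with_itself compose_relation_with_itself_alt
  have : ∀ (L : List Int) (s : List (Int × Int)),
      L.foldl
        (fun relation_two _ =>
          relation.foldl
            (fun composite x =>
              relation_two.foldl
                (fun composite y =>
                  if y.1 == x.2 then
                    if (x.1, y.2) ∈ composite then composite
                    else composite ++ [(x.1, y.2)]
                  else composite)
                composite)
            [])
        s
      = L.foldl (fun current _ => pvStep relation current) s := by
    intro L
    induction L with
    | nil => intro s; rfl
    | cons i t ih => intro s; simp only [List.foldl_cons, ih, step_eq]
  exact this _ relation
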